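-- pv_equiv track=rewrite | github.com/mewada-madhusudan/sqlite_flask | latest_flask.py | validate_query_type
-- ===== SOURCE A (Python) =====
-- def validate_query_type(query, expected_type):
--     """Validate that the query matches the expected operation type"""
--     query_upper = query.strip().upper()
--
--     if expected_type == "SELECT":
--         if not query_upper.startswith('SELECT'):
--             return False, "Only SELECT queries are allowed for this endpoint"
--         # Check for dangerous operations in SELECT
--         dangerous_in_select = ['DROP', 'DELETE', 'TRUNCATE', 'ALTER', 'CREATE', 'INSERT', 'UPDATE']
--         if any(keyword in query_upper for keyword in dangerous_in_select):
--             return False, "SELECT queries cannot contain write operations"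
--
--     elif expected_type == "INSERT":
--         if not query_upper.startswith('INSERT'):
--             return False, "Only INSERT queries are allowed for this endpoint"
--
--     elif expected_type == "UPDATE":
--         if not (query_upper.startswith('UPDATE') or query_upper.startswith('DELETE')):
--             return False, "Only UPDATE and DELETE queries are allowed for this endpoint"
--         # Additional protection against dangerous operations
--         if any(keyword in query_upper for keyword in ['DROP', 'TRUNCATE', 'ALTER', 'CREATE']):
--             return False, "Dangerous operations are not allowed"
--
--     return True, "Valid query"
-- ===== SOURCE B (Python) =====
-- _KEYWORDS = ('SELECT', 'INSERT', 'UPDATE', 'DELETE', 'DROP', 'TRUNCATE', 'ALTER', 'CREATE')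
--
--
-- def _scan(q):
--     """Single left-to-right scan: the set of keywords occurring anywhere in q,
--     and the set of keywords occurring at position 0."""
--     present = set()
--     head = set()
--     for i in range(len(q)):
--         for kw in _KEYWORDS:
--             if q[i:i + len(kw)] == kw:
--                 present.add(kw)
--                 if i == 0:
--                     head.add(kw)
--     return present, head
--
--
-- def validate_query_type(query, expected_type):
--     """Validate that the query matches the expected operation type.
--
--     One scan of the normalized query collects which SQL keywords occur
--     (and which occur at the start); the verdict is decided from those two sets.
--     """
--     present, head = _scan(query.strip().upper())
--     if expected_type == "SELECT":
--         if 'SELECT' not in head: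
--             return False, "Only SELECT queries are allowed for this endpoint"
--         if not present.isdisjoint({'DROP', 'DELETE', 'TRUNCATE', 'ALTER', 'CREATE', 'INSERT', 'UPDATE'}):
--             return False, "SELECT queries cannot contain write operations"
--     elif expected_type == "INSERT":
--         if 'INSERT' not in head:
--             return False, "Only INSERT queries are allowed for this endpoint"
--     elif expected_type == "UPDATE":
--         if head.isdisjoint({'UPDATE', 'DELETE'}):
--             return False, "Only UPDATE and DELETE queries are allowed for this endpoint"
--         if not present.isdisjoint({'DROP', 'TRUNCATE', 'ALTER', 'CREATE'}):
--             return False, "Dangerous operations are not allowed"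
--     return True, "Valid query"
-- ===== Notes on version B (the rewrite author's own statement) =====
-- stated objective: alternative
-- what changed: Instead of A's per-branch startswith and per-keyword substring searches, B makes one left-to-right scan of the normalized query collecting the set of SQL keywords that occur anywhere and the set that occur at position 0, then decides the verdict purely from those two sets.
import Mathlib
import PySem

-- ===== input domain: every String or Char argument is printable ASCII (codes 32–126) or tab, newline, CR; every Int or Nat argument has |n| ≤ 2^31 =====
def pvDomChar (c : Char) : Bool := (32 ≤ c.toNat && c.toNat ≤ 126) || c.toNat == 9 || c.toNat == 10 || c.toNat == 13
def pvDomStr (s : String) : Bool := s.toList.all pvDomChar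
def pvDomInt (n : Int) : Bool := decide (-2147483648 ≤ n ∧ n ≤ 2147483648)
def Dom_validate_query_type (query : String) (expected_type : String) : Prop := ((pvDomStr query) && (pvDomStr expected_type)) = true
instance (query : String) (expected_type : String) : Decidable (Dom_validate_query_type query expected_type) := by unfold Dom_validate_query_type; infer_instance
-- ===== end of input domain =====

-- B replaces A's per-branch startswith/substring tests by ONE left-to-right scan of the query that collects the sets of SQL keywords occurring anywhere and at position 0, then decides from those two sets; objective: alternative.


-- ===== PORT A =====
def validate_query_type (query : String) (expected_type : String) : Bool × String :=
  let query_upper := PySem.Str.upper (PySem.Str.strip query)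
  if expected_type = "SELECT" then
    if !(PySem.Str.startswith query_upper "SELECT") then
      (false, "Only SELECT queries are allowed for this endpoint")
    else if (["DROP", "DELETE", "TRUNCATE", "ALTER", "CREATE", "INSERT", "UPDATE"] : List String).any
        (fun keyword => PySem.Str.isIn keyword query_upper) then
      (false, "SELECT queries cannot contain write operations")
    else (true, "Valid query")
  else if expected_type = "INSERT" then
    if !(PySem.Str.startswith query_upper "INSERT") then
      (false, "Only INSERT queries are allowed for this endpoint")
    else (true, "Valid query")
  else if expected_type = "UPDATE" then
    if !(PySem.Str.startswith query_upper "UPDATE" || PySem.Str.startswith query_upper "DELETE") then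
      (false, "Only UPDATE and DELETE queries are allowed for this endpoint")
    else if (["DROP", "TRUNCATE", "ALTER", "CREATE"] : List String).any
        (fun keyword => PySem.Str.isIn keyword query_upper) then
      (false, "Dangerous operations are not allowed")
    else (true, "Valid query")
  else (true, "Valid query")

-- ===== PORT B =====
def pvKeywords : List String :=
  ["SELECT", "INSERT", "UPDATE", "DELETE", "DROP", "TRUNCATE", "ALTER", "CREATE"]

-- inner loop body of _scan: try keyword kw at position i of q and extend (present, head);
-- 'q[i:i+len(kw)] == kw' is ported as '(q.drop i).take kw.toList.length = kw.toList',
-- exact by PySem.List.slice_natCast_add (slice bounds are the naturals i and i+len(kw))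
def pvScanStep (q : List Char) (i : Nat)
    (st : PySem.Set String × PySem.Set String) (kw : String) :
    PySem.Set String × PySem.Set String :=
  if (q.drop i).take kw.toList.length = kw.toList then
    (PySem.Set.add st.1 kw, if i = 0 then PySem.Set.add st.2 kw else st.2)
  else st

-- _scan: for i in range(len(q)): for kw in _KEYWORDS: …  returning (present, head)
def pvScan (q : List Char) : PySem.Set String × PySem.Set String :=
  (List.range q.length).foldl (fun st i => pvKeywords.foldl (pvScanStep q i) st)
    (PySem.Set.empty, PySem.Set.empty)

-- the decision from the two keyword sets (the if/elif ladder after the scan)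
def pvDecide (expected_type : String) (st : PySem.Set String × PySem.Set String) : Bool × String :=
  if expected_type = "SELECT" then
    if !(PySem.Set.contains st.2 "SELECT") then
      (false, "Only SELECT queries are allowed for this endpoint")
    else if !(PySem.Set.isdisjoint st.1
        (PySem.Set.ofList ["DROP", "DELETE", "TRUNCATE", "ALTER", "CREATE", "INSERT", "UPDATE"])) then
      (false, "SELECT queries cannot contain write operations")
    else (true, "Valid query")
  else if expected_type = "INSERT" then
    if !(PySem.Set.contains st.2 "INSERT") then
      (false, "Only INSERT queries are allowed for this endpoint")
    else (true, "Valid query")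
  else if expected_type = "UPDATE" then
    if PySem.Set.isdisjoint st.2 (PySem.Set.ofList ["UPDATE", "DELETE"]) then
      (false, "Only UPDATE and DELETE queries are allowed for this endpoint")
    else if !(PySem.Set.isdisjoint st.1
        (PySem.Set.ofList ["DROP", "TRUNCATE", "ALTER", "CREATE"])) then
      (false, "Dangerous operations are not allowed")
    else (true, "Valid query")
  else (true, "Valid query")

def validate_query_type_alt (query : String) (expected_type : String) : Bool × String :=
  pvDecide expected_type (pvScan (PySem.Str.upper (PySem.Str.strip query)).toList)

-- ===== PRECONDITION & SPEC =====
def Spec_validate_query_type (query : String) (expected_type : String) (out : Bool × String) : Prop := out = validate_query_type_alt query expected_type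
instance (query : String) (expected_type : String) (out : Bool × String) : Decidable (Spec_validate_query_type query expected_type out) := by unfold Spec_validate_query_type; infer_instance

-- ===== CLAIM =====
def Claim_equal_validate_query_type : Prop := ∀ (query : String) (expected_type : String), Dom_validate_query_type query expected_type → Spec_validate_query_type query expected_type (validate_query_type query expected_type)

-- ===== LEMMAS AND PROOFS =====

lemma mem_foldl_scanStep_fst (q : List Char) (i : Nat) (L : List String)
    (st : PySem.Set String × PySem.Set String) (x : String) :
    x ∈ (L.foldl (pvScanStep q i) st).1 ↔
      x ∈ st.1 ∨ (x ∈ L ∧ (q.drop i).take x.toList.length = x.toList) := by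
  induction L generalizing st with
  | nil => simp
  | cons kw tl ih =>
    rw [List.foldl_cons, ih]
    unfold pvScanStep
    split_ifs <;> simp only [PySem.Set.mem_add, List.mem_cons] <;>
      rcases eq_or_ne x kw with rfl | hx <;> tauto

lemma mem_foldl_scanStep_snd (q : List Char) (i : Nat) (L : List String)
    (st : PySem.Set String × PySem.Set String) (x : String) :
    x ∈ (L.foldl (pvScanStep q i) st).2 ↔
      x ∈ st.2 ∨ (i = 0 ∧ x ∈ L ∧ (q.drop i).take x.toList.length = x.toList) := by
  induction L generalizing st with
  | nil => simp
  | cons kw tl ih =>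
    rw [List.foldl_cons, ih]
    unfold pvScanStep
    split_ifs <;> simp only [PySem.Set.mem_add, List.mem_cons] <;>
      rcases eq_or_ne x kw with rfl | hx <;> tauto

lemma mem_scanRange_fst (q : List Char) (n : Nat)
    (st : PySem.Set String × PySem.Set String) (x : String) :
    x ∈ ((List.range n).foldl (fun st i => pvKeywords.foldl (pvScanStep q i) st) st).1 ↔
      x ∈ st.1 ∨ (x ∈ pvKeywords ∧ ∃ i < n, (q.drop i).take x.toList.length = x.toList) := by
  induction n with
  | zero => simp
  | succ n ih =>
    rw [List.range_succ, List.foldl_append, List.foldl_cons, List.foldl_nil,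
      mem_foldl_scanStep_fst, ih]
    constructor
    · rintro ((hs | ⟨hk, i, hi, hc⟩) | ⟨hk, hc⟩)
      · exact Or.inl hs
      · exact Or.inr ⟨hk, i, Nat.lt_succ_of_lt hi, hc⟩
      · exact Or.inr ⟨hk, n, Nat.lt_succ_self n, hc⟩
    · rintro (hs | ⟨hk, i, hi, hc⟩)
      · exact Or.inl (Or.inl hs)
      · rcases Nat.lt_succ_iff_lt_or_eq.mp hi with h | rfl
        · exact Or.inl (Or.inr ⟨hk, i, h, hc⟩)
        · exact Or.inr ⟨hk, hc⟩

lemma mem_scanRange_snd (q : List Char) (n : Nat)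
    (st : PySem.Set String × PySem.Set String) (x : String) :
    x ∈ ((List.range n).foldl (fun st i => pvKeywords.foldl (pvScanStep q i) st) st).2 ↔
      x ∈ st.2 ∨ (0 < n ∧ x ∈ pvKeywords ∧ q.take x.toList.length = x.toList) := by
  induction n with
  | zero => simp
  | succ n ih =>
    rw [List.range_succ, List.foldl_append, List.foldl_cons, List.foldl_nil,
      mem_foldl_scanStep_snd, ih]
    constructor
    · rintro ((hs | ⟨_, hk, hc⟩) | ⟨h0, hk, hc⟩)
      · exact Or.inl hs
      · exact Or.inr ⟨Nat.succ_pos n, hk, hc⟩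
      · subst h0; exact Or.inr ⟨Nat.succ_pos 0, hk, by simpa using hc⟩
    · rintro (hs | ⟨_, hk, hc⟩)
      · exact Or.inl (Or.inl hs)
      · cases n with
        | zero => exact Or.inr ⟨rfl, hk, by simpa using hc⟩
        | succ m => exact Or.inl (Or.inr ⟨Nat.succ_pos m, hk, hc⟩)

lemma keyword_ne_nil (x : String) (hx : x ∈ pvKeywords) : x.toList ≠ [] := by
  fin_cases hx <;> decide

lemma exists_take_iff_isIn (q kl : List Char) (hk : kl ≠ []) :
    (∃ i < q.length, (q.drop i).take kl.length = kl) ↔ PySem.Chars.isIn kl q = true := by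
  rw [← PySem.Chars.exists_prefix_drop_iff_isIn]
  constructor
  · rintro ⟨i, _, ht⟩
    exact ⟨i, List.prefix_iff_eq_take.mpr ht.symm⟩
  · rintro ⟨j, hp⟩
    refine ⟨j, ?_, (List.prefix_iff_eq_take.mp hp).symm⟩
    by_contra hj
    rw [List.drop_eq_nil_of_le (Nat.le_of_not_lt hj)] at hp
    exact hk (List.prefix_nil.mp hp)

lemma mem_scan_fst_iff (q : List Char) (x : String) :
    x ∈ (pvScan q).1 ↔ x ∈ pvKeywords ∧ PySem.Chars.isIn x.toList q = true := by
  unfold pvScan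
  rw [mem_scanRange_fst]
  simp only [PySem.Set.empty, List.not_mem_nil, false_or]
  constructor
  · rintro ⟨hk, hi⟩
    exact ⟨hk, (exists_take_iff_isIn q x.toList (keyword_ne_nil x hk)).mp hi⟩
  · rintro ⟨hk, hi⟩
    exact ⟨hk, (exists_take_iff_isIn q x.toList (keyword_ne_nil x hk)).mpr hi⟩

lemma mem_scan_snd_iff (q : List Char) (x : String) :
    x ∈ (pvScan q).2 ↔ x ∈ pvKeywords ∧ PySem.Chars.startswith q x.toList = true := by
  unfold pvScan
  rw [mem_scanRange_snd]
  simp only [PySem.Set.empty, List.not_mem_nil, false_or]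
  constructor
  · rintro ⟨_, hk, hc⟩
    exact ⟨hk, (PySem.Chars.startswith_iff q x.toList).mpr (List.prefix_iff_eq_take.mpr hc.symm)⟩
  · rintro ⟨hk, hs⟩
    have hp := (PySem.Chars.startswith_iff q x.toList).mp hs
    have hne := keyword_ne_nil x hk
    refine ⟨?_, hk, (List.prefix_iff_eq_take.mp hp).symm⟩
    cases q with
    | nil => exact absurd (List.prefix_nil.mp hp) hne
    | cons a l => exact Nat.succ_pos _

-- head-set membership as a Bool equals A's startswith test
lemma contains_head_eq (q : List Char) (kw : String) (hk : kw ∈ pvKeywords) :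
    PySem.Set.contains (pvScan q).2 kw = PySem.Chars.startswith q kw.toList := by
  rw [Bool.eq_iff_iff, PySem.Set.contains_iff, mem_scan_snd_iff]
  exact ⟨fun h => h.2, fun h => ⟨hk, h⟩⟩

-- non-disjointness of the present-set with a keyword list equals A's any-isIn test
lemma not_isdisjoint_present_eq (q : List Char) (L : List String)
    (hL : ∀ x ∈ L, x ∈ pvKeywords) :
    (!PySem.Set.isdisjoint (pvScan q).1 (PySem.Set.ofList L)) =
      L.any (fun kw => PySem.Chars.isIn kw.toList q) := by
  cases hd : PySem.Set.isdisjoint (pvScan q).1 (PySem.Set.ofList L) with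
  | true =>
    have h := (PySem.Set.isdisjoint_iff _ _).mp hd
    symm
    simp only [Bool.not_true]
    rw [List.any_eq_false]
    intro kw hkw hin
    exact h kw ((mem_scan_fst_iff q kw).mpr ⟨hL kw hkw, hin⟩)
      ((PySem.Set.mem_ofList L kw).mpr hkw)
  | false =>
    symm
    rw [Bool.not_false, List.any_eq_true]
    have hne : ¬ ∀ x ∈ (pvScan q).1, x ∉ PySem.Set.ofList L := by
      intro hall
      rw [(PySem.Set.isdisjoint_iff _ _).mpr hall] at hd
      exact Bool.noConfusion hd
    rcases not_forall.mp hne with ⟨x, hx⟩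
    rcases Classical.not_imp.mp hx with ⟨hx1, hx2⟩
    have hm := (mem_scan_fst_iff q x).mp hx1
    exact ⟨x, (PySem.Set.mem_ofList L x).mp (not_not.mp hx2), hm.2⟩

-- head-set disjointness from {UPDATE, DELETE} equals the negated A test
lemma isdisjoint_head_eq (q : List Char) :
    PySem.Set.isdisjoint (pvScan q).2 (PySem.Set.ofList ["UPDATE", "DELETE"]) =
      (!(PySem.Chars.startswith q "UPDATE".toList || PySem.Chars.startswith q "DELETE".toList)) := by
  rw [Bool.eq_iff_iff, PySem.Set.isdisjoint_iff, Bool.not_eq_true', Bool.or_eq_false_iff]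
  constructor
  · intro h
    constructor
    · cases hu : PySem.Chars.startswith q "UPDATE".toList with
      | false => rfl
      | true =>
        exact absurd ((PySem.Set.mem_ofList ["UPDATE", "DELETE"] "UPDATE").mpr (by simp))
          (h "UPDATE" ((mem_scan_snd_iff q _).mpr ⟨by simp [pvKeywords], hu⟩))
    · cases hd : PySem.Chars.startswith q "DELETE".toList with
      | false => rfl
      | true =>
        exact absurd ((PySem.Set.mem_ofList ["UPDATE", "DELETE"] "DELETE").mpr (by simp))
          (h "DELETE" ((mem_scan_snd_iff q _).mpr ⟨by simp [pvKeywords], hd⟩))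
  · rintro ⟨hu, hd⟩ x hx hx'
    have hm := (mem_scan_snd_iff q x).mp hx
    have hx2 := (PySem.Set.mem_ofList ["UPDATE", "DELETE"] x).mp hx'
    simp only [List.mem_cons, List.not_mem_nil, or_false] at hx2
    rcases hx2 with rfl | rfl
    · rw [hm.2] at hu; exact Bool.noConfusion hu
    · rw [hm.2] at hd; exact Bool.noConfusion hd

-- ===== VERDICT =====
theorem validate_query_type_spec : Claim_equal_validate_query_type := by
  intro query expected_type _
  unfold Spec_validate_query_type validate_query_type validate_query_type_alt pvDecide
  by_cases h1 : expected_type = "SELECT"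
  · rw [if_pos h1, if_pos h1]
    simp only [PySem.Str.startswith_eq, PySem.Str.isIn_eq]
    rw [contains_head_eq (PySem.Str.upper (PySem.Str.strip query)).toList "SELECT"
      (by simp [pvKeywords])]
    have ha := not_isdisjoint_present_eq (PySem.Str.upper (PySem.Str.strip query)).toList
      ["DROP", "DELETE", "TRUNCATE", "ALTER", "CREATE", "INSERT", "UPDATE"]
      (by intro x hx; fin_cases hx <;> simp [pvKeywords])
    rw [ha]
    rfl
  · by_cases h2 : expected_type = "INSERT"
    · rw [if_neg h1, if_neg h1, if_pos h2, if_pos h2]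
      simp only [PySem.Str.startswith_eq]
      rw [contains_head_eq (PySem.Str.upper (PySem.Str.strip query)).toList "INSERT"
        (by simp [pvKeywords])]
      rfl
    · by_cases h3 : expected_type = "UPDATE"
      · rw [if_neg h1, if_neg h1, if_neg h2, if_neg h2, if_pos h3, if_pos h3]
        simp only [PySem.Str.startswith_eq, PySem.Str.isIn_eq]
        rw [isdisjoint_head_eq (PySem.Str.upper (PySem.Str.strip query)).toList]
        have ha := not_isdisjoint_present_eq (PySem.Str.upper (PySem.Str.strip query)).toList
          ["DROP", "TRUNCATE", "ALTER", "CREATE"]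
          (by intro x hx; fin_cases hx <;> simp [pvKeywords])
        rw [ha]
        rfl
      · rw [if_neg h1, if_neg h1, if_neg h2, if_neg h2, if_neg h3, if_neg h3]
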